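-- pv_equiv track=rewrite | github.com/JuanTaco666/AVSync | SyncAudio.py | out_of_order_indices
-- ===== SOURCE A (Python) =====
-- def is_sorted(data):
--     for i in range(1, len(data)):
--         if data[i - 1] > data[i]:
--             return False
--     return True
--
-- def out_of_order_indices(data):
--     if is_sorted(data):
--         return []
--     worst_cost = 0.0
--     worst_index = 0
--     for i in range(0, len(data)):
--         cost = 0
--         for j in range(0, i):
--             if data[j] > data[i]:
--                 cost += 1
--         for j in range(i + 1, len(data)):
--             if data[j] < data[i]:
--                 cost += 1
--         if cost > worst_cost:
--             worst_index = i
--             worst_cost = cost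
--     copy = list.copy(data)
--     copy.pop(worst_index)
--     indices_to_remove = out_of_order_indices(copy)
--     for i in range(0, len(indices_to_remove)):
--         if worst_index <= indices_to_remove[i]:
--             indices_to_remove[i] += 1
--     indices_to_remove.append(worst_index)
--     return indices_to_remove
-- ===== SOURCE B (Python) =====
-- def out_of_order_indices(data):
--     # Iterative re-implementation: carry original indices alongside values,
--     # so no recursive index re-adjustment pass is needed.
--     items = list(enumerate(data))
--     out = []
--     while any(a[1] > b[1] for a, b in zip(items, items[1:])):
--         best_i, best_c = 0, 0
--         for i, (_, v) in enumerate(items):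
--             c = sum(1 for (_, u) in items[:i] if u > v) \
--               + sum(1 for (_, u) in items[i + 1:] if u < v)
--             if c > best_c:
--                 best_i, best_c = i, c
--         out.append(items[best_i][0])
--         del items[best_i]
--     return list(reversed(out))
-- ===== Notes on version B (the rewrite author's own statement) =====
-- stated objective: alternative
-- what changed: Replaces A's recursion-with-index-readjustment by an iterative loop that carries each element's original index in (index, value) pairs, selects the worst pair, deletes it in place, and reverses the collected original indices at the end; counting uses slice comprehensions instead of index double loops.
import Mathlib
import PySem

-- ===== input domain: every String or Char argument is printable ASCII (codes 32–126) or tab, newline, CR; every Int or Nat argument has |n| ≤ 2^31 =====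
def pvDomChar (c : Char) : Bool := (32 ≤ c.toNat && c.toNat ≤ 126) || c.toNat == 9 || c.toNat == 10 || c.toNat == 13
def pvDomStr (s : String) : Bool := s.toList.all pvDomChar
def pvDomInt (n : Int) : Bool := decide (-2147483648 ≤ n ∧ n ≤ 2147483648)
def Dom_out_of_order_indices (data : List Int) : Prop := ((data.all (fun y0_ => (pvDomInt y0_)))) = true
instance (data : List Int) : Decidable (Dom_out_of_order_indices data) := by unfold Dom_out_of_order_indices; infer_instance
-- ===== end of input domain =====

-- B replaces A's recursion-with-index-readjustment by an iterative loop over (original-index, value)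
-- pairs; equal return values are proved on every input (both functions are total and pure).

-- ===== PORT A =====
def is_sorted (data : List Int) : Bool :=
  (PySem.List.pyRange 1 (data.length : Int) 1).all
    (fun i => !decide (PySem.List.pyGetD data (i - 1) 0 > PySem.List.pyGetD data i 0))

-- the worst_cost/worst_index selection loop of A; worst_cost starts as Python's 0.0 but is only
-- ever compared with / set to int costs, so Int 0 is exact
def worstA (data : List Int) : Int × Int :=
  (PySem.List.pyRange 0 (data.length : Int) 1).foldl
    (fun (st : Int × Int) i =>
      let cost1 := (PySem.List.pyRange 0 i 1).foldl
        (fun c j => if PySem.List.pyGetD data j 0 > PySem.List.pyGetD data i 0 then c + 1 else c) (0 : Int)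
      let cost := (PySem.List.pyRange (i + 1) (data.length : Int) 1).foldl
        (fun c j => if PySem.List.pyGetD data j 0 < PySem.List.pyGetD data i 0 then c + 1 else c) cost1
      if cost > st.1 then (cost, i) else st)
    ((0 : Int), (0 : Int))

def out_of_order_indices (data : List Int) : List Int :=
  if is_sorted data then []
  else
    let w := (worstA data).2
    match h : PySem.List.pop? data w with
    | none => []  -- unreachable totality guard: here data is unsorted, so w is a valid index
    | some r =>
      let rec_res := out_of_order_indices r.2
      rec_res.map (fun x => if w ≤ x then x + 1 else x) ++ [w]
termination_by data.length
decreasing_by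
  have := PySem.List.length_of_pop?_eq_some data h; omega

-- ===== PORT B =====
-- the best_i/best_c selection loop of B
def altStep (items : List (Int × Int)) : Int × Int :=
  (PySem.List.enumerate items).foldl
    (fun (st : Int × Int) p =>
      let c : Int :=
        ((PySem.List.slice items none (some p.1)).countP (fun q => decide (q.2 > p.2.2)) : Int)
        + ((PySem.List.slice items (some (p.1 + 1)) none).countP (fun q => decide (q.2 < p.2.2)) : Int)
      if c > st.2 then (p.1, c) else st)
    ((0 : Int), (0 : Int))

-- the while loop of B
def altGo (items : List (Int × Int)) (out : List Int) : List Int :=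
  if (items.zip (PySem.List.slice items (some 1) none)).any (fun p => decide (p.1.2 > p.2.2)) then
    match h : PySem.List.pop? items (altStep items).1 with
    | none => out  -- unreachable totality guard: here items is unsorted, so best_i is a valid index
    | some r => altGo r.2 (out ++ [r.1.1])
  else out
termination_by items.length
decreasing_by
  have := PySem.List.length_of_pop?_eq_some items h; omega

def out_of_order_indices_alt (data : List Int) : List Int :=
  (altGo (PySem.List.enumerate data) []).reverse

-- ===== PRECONDITION & SPEC =====
def Spec_out_of_order_indices (data : List Int) (out : List Int) : Prop := out = out_of_order_indices_alt data
instance (data : List Int) (out : List Int) : Decidable (Spec_out_of_order_indices data out) := by unfold Spec_out_of_order_indices; infer_instance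

-- ===== CLAIM (what is proved, stated in full; the proofs are below) =====
def Claim_equal_out_of_order_indices : Prop := ∀ (data : List Int), Dom_out_of_order_indices data → Spec_out_of_order_indices data (out_of_order_indices data)

-- ===== LEMMAS AND PROOFS =====

-- adjacent-inversion characterisation shared by both sorted tests
def hasInv (d : List Int) : Prop := ∃ k : Nat, k + 1 < d.length ∧ d.getD k 0 > d.getD (k + 1) 0

lemma is_sorted_iff (d : List Int) : is_sorted d = false ↔ hasInv d := by
  rw [← Bool.not_eq_true]
  simp only [is_sorted, List.all_eq_true, PySem.List.mem_pyRange_one, not_forall]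
  constructor
  · rintro ⟨i, hi, hlt⟩
    simp at hlt
    obtain ⟨h1, h2⟩ := hi
    refine ⟨(i - 1).toNat, by omega, ?_⟩
    have e1 : ((i - 1).toNat : Int) = i - 1 := by omega
    have e2 : (((i - 1).toNat + 1 : Nat) : Int) = i := by omega
    rw [← PySem.List.pyGetD_natCast, ← PySem.List.pyGetD_natCast, e1, e2]
    exact hlt
  · rintro ⟨k, hk, hgt⟩
    refine ⟨(k : Int) + 1, ⟨by omega, by omega⟩, ?_⟩
    simp only [add_sub_cancel_right]
    have e : ((k : Int) + 1) = (((k + 1 : Nat)) : Int) := by push_cast; ring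
    rw [e, PySem.List.pyGetD_natCast, PySem.List.pyGetD_natCast]
    simpa using hgt

lemma zipAny_iff (d : List Int) :
    ((d.zip (d.drop 1)).any (fun p => decide (p.1 > p.2)) = true) ↔ hasInv d := by
  simp only [List.any_eq_true]
  constructor
  · rintro ⟨p, hp, hgt⟩
    obtain ⟨i, hi, he⟩ := List.mem_iff_getElem.1 hp
    subst he
    simp only [List.length_zip, List.length_drop] at hi
    have h1 : i < d.length := by omega
    have h2 : i + 1 < d.length := by omega
    refine ⟨i, h2, ?_⟩
    simp only [List.getElem_zip, List.getElem_drop, decide_eq_true_eq] at hgt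
    rw [List.getD_eq_getElem _ _ h1, List.getD_eq_getElem _ _ h2]
    simpa [show 1 + i = i + 1 from by omega] using hgt
  · rintro ⟨k, hk, hgt⟩
    have h1 : k < d.length := by omega
    have hz : k < (d.zip (d.drop 1)).length := by
      simp only [List.length_zip, List.length_drop]; omega
    refine ⟨(d.zip (d.drop 1))[k], List.getElem_mem hz, ?_⟩
    simp only [List.getElem_zip, List.getElem_drop, decide_eq_true_eq]
    rw [List.getD_eq_getElem _ _ h1, List.getD_eq_getElem _ _ hk] at hgt
    simpa [show 1 + k = k + 1 from by omega] using hgt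

lemma condB_eq (items : List (Int × Int)) :
    ((items.zip (PySem.List.slice items (some 1) none)).any (fun p => decide (p.1.2 > p.2.2)))
      = !is_sorted (items.map Prod.snd) := by
  have hbr : ((items.map Prod.snd).zip ((items.map Prod.snd).drop 1)).any (fun p => decide (p.1 > p.2))
      = (items.zip (items.drop 1)).any (fun p => decide (p.1.2 > p.2.2)) := by
    rw [← List.map_drop, List.zip_map, List.any_map]
    exact congrArg _ (funext fun p => match p with | ((a,b),(c,e)) => rfl)
  rw [PySem.List.slice_from_one, ← List.drop_one, ← hbr]
  cases hs : is_sorted (items.map Prod.snd) with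
  | false =>
    simp only [Bool.not_false]
    exact (zipAny_iff _).2 ((is_sorted_iff _).1 hs)
  | true =>
    simp only [Bool.not_true]
    rw [← Bool.not_eq_true]
    intro h
    have := (is_sorted_iff (items.map Prod.snd)).2 ((zipAny_iff _).1 h)
    rw [hs] at this; cases this

lemma sel_fold_swap (cA cB : Int → Int) :
    ∀ (L : List Int), (∀ j ∈ L, cB j = cA j) → ∀ (s : Int × Int),
      L.foldl (fun st j => if cB j > st.2 then (j, cB j) else st) s
        = Prod.swap (L.foldl (fun st j => if cA j > st.1 then (cA j, j) else st) s.swap) := by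
  intro L
  induction L with
  | nil => intro _ s; simp
  | cons x L ih =>
    intro h s
    have hx : cB x = cA x := h x (by simp)
    simp only [List.foldl_cons]
    rw [hx]
    have hs : (Prod.swap s).1 = s.2 := rfl
    by_cases hc : cA x > s.2
    · rw [if_pos hc, if_pos (by simpa [hs] using hc)]
      have := ih (fun j hj => h j (by simp [hj])) (x, cA x)
      simpa using this
    · rw [if_neg hc, if_neg (by simpa [hs] using hc)]
      exact ih (fun j hj => h j (by simp [hj])) s

lemma countP_snd_gt (items : List (Int × Int)) (V : Int) :
    items.countP (fun q => decide (q.2 > V)) = (items.map Prod.snd).countP (fun x => decide (x > V)) := by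
  rw [List.countP_map]; rfl

lemma countP_snd_lt (items : List (Int × Int)) (V : Int) :
    items.countP (fun q => decide (q.2 < V)) = (items.map Prod.snd).countP (fun x => decide (x < V)) := by
  rw [List.countP_map]; rfl

lemma pyGetD_take (d : List Int) (m : Nat) (i : Int) (h0 : 0 ≤ i) (h1 : i < (m : Int))
    (h2 : i < (d.length : Int)) :
    PySem.List.pyGetD (d.take m) i 0 = PySem.List.pyGetD d i 0 := by
  rw [PySem.List.pyGetD_eq_getElem _ _ h0 (by simp; omega),
      PySem.List.pyGetD_eq_getElem _ _ h0 (by simpa using h2)]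
  exact List.getElem_take

lemma cost_eq (items : List (Int × Int)) (j : Int) (h0 : 0 ≤ j) (h1 : j < (items.length : Int)) :
    ((PySem.List.slice items none (some j)).countP
        (fun q => decide (q.2 > (PySem.List.pyGetD items j ((0 : Int), (0 : Int))).2)) : Int)
      + ((PySem.List.slice items (some (j + 1)) none).countP
        (fun q => decide (q.2 < (PySem.List.pyGetD items j ((0 : Int), (0 : Int))).2)) : Int)
    = (PySem.List.pyRange (j + 1) ((items.length : Int)) 1).foldl
        (fun c j2 => if PySem.List.pyGetD (items.map Prod.snd) j2 0 < PySem.List.pyGetD (items.map Prod.snd) j 0 then c + 1 else c)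
        ((PySem.List.pyRange 0 j 1).foldl
          (fun c j2 => if PySem.List.pyGetD (items.map Prod.snd) j2 0 > PySem.List.pyGetD (items.map Prod.snd) j 0 then c + 1 else c) (0 : Int)) := by
  set d := items.map Prod.snd with hd
  have hlen : d.length = items.length := by simp [hd]
  rw [show ((items.length : Int)) = ((d.length : Int)) from by rw [hlen]]
  have hdl : j < (d.length : Int) := by rw [hlen]; exact h1
  have hv : (PySem.List.pyGetD items j ((0 : Int), (0 : Int))).2 = PySem.List.pyGetD d j 0 := by
    rw [PySem.List.pyGetD_eq_getElem _ _ h0 h1, PySem.List.pyGetD_eq_getElem _ _ h0 hdl]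
    simp [hd]
  rw [hv, PySem.List.slice_to _ h0, PySem.List.slice_from _ (by omega)]
  rw [countP_snd_gt, countP_snd_lt, List.map_take, List.map_drop, ← hd]
  -- A's first inner loop is a count over d.take j.toNat
  have e1 : ∀ (c : Int), ∀ j2 ∈ PySem.List.pyRange 0 j 1,
      (if PySem.List.pyGetD d j2 0 > PySem.List.pyGetD d j 0 then c + 1 else c)
        = (if PySem.List.pyGetD (d.take j.toNat) j2 0 > PySem.List.pyGetD d j 0 then c + 1 else c) := by
    intro c j2 hj2
    rw [PySem.List.mem_pyRange_one] at hj2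
    rw [pyGetD_take d j.toNat j2 hj2.1 (by omega) (by omega)]
  rw [PySem.List.foldl_congr_mem _ _ _ _ e1]
  have e2 : (PySem.List.pyRange 0 j 1) = PySem.List.pyRange 0 (((d.take j.toNat).length : Int)) 1 := by
    congr 1
    simp [hlen]
    omega
  rw [e2, PySem.List.foldl_pyRange_zero_pyGetD' (d.take j.toNat) 0
        (fun c x => if x > PySem.List.pyGetD d j 0 then c + 1 else c) 0]
  rw [PySem.List.foldl_pyRange_pyGetD' d 0
        (fun c x => if x < PySem.List.pyGetD d j 0 then c + 1 else c) _ (by omega)]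
  rw [PySem.List.foldl_ite_add_one, PySem.List.foldl_ite_add_one]
  ring

lemma altStep_eq (items : List (Int × Int)) :
    altStep items = Prod.swap (worstA (items.map Prod.snd)) := by
  unfold altStep worstA
  rw [PySem.List.enumerate_eq_map_pyRange items ((0 : Int), (0 : Int)), List.foldl_map]
  simp only [PySem.List.len_eq, List.length_map]
  exact sel_fold_swap
    (fun i => (PySem.List.pyRange (i + 1) ((items.length : Int)) 1).foldl
        (fun c j2 => if PySem.List.pyGetD (items.map Prod.snd) j2 0 < PySem.List.pyGetD (items.map Prod.snd) i 0 then c + 1 else c)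
        ((PySem.List.pyRange 0 i 1).foldl
          (fun c j2 => if PySem.List.pyGetD (items.map Prod.snd) j2 0 > PySem.List.pyGetD (items.map Prod.snd) i 0 then c + 1 else c) (0 : Int)))
    (fun j => ((PySem.List.slice items none (some j)).countP
        (fun q => decide (q.2 > (PySem.List.pyGetD items j ((0 : Int), (0 : Int))).2)) : Int)
      + ((PySem.List.slice items (some (j + 1)) none).countP
        (fun q => decide (q.2 < (PySem.List.pyGetD items j ((0 : Int), (0 : Int))).2)) : Int))
    (PySem.List.pyRange 0 (items.length : Int) 1)
    (fun j hj => by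
      rw [PySem.List.mem_pyRange_one] at hj
      exact cost_eq items j hj.1 hj.2)
    ((0 : Int), (0 : Int))

lemma sel_fold_snd (c : Int → Int) :
    ∀ (L : List Int) (s : Int × Int),
      (L.foldl (fun st i => if c i > st.1 then (c i, i) else st) s).2 = s.2 ∨
      (L.foldl (fun st i => if c i > st.1 then (c i, i) else st) s).2 ∈ L := by
  intro L
  induction L with
  | nil => intro s; simp
  | cons x L ih =>
    intro s
    simp only [List.foldl_cons, List.mem_cons]
    by_cases hc : c x > s.1
    · rw [if_pos hc]
      rcases ih (c x, x) with h | h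
      · exact Or.inr (Or.inl h)
      · exact Or.inr (Or.inr h)
    · rw [if_neg hc]
      rcases ih s with h | h
      · exact Or.inl h
      · exact Or.inr (Or.inr h)

-- the selected index never leaves the list when the list is unsorted
lemma worstA_mem (d : List Int) (h : is_sorted d = false) :
    0 ≤ (worstA d).2 ∧ (worstA d).2 < (d.length : Int) := by
  have hinv := (is_sorted_iff d).1 h
  obtain ⟨k, hk, -⟩ := hinv
  have hlen : 2 ≤ d.length := by omega
  have hm := sel_fold_snd
    (fun i => (PySem.List.pyRange (i + 1) ((d.length : Int)) 1).foldl
        (fun c j2 => if PySem.List.pyGetD d j2 0 < PySem.List.pyGetD d i 0 then c + 1 else c)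
        ((PySem.List.pyRange 0 i 1).foldl
          (fun c j2 => if PySem.List.pyGetD d j2 0 > PySem.List.pyGetD d i 0 then c + 1 else c) (0 : Int)))
    (PySem.List.pyRange 0 (d.length : Int) 1) ((0 : Int), (0 : Int))
  have he : worstA d = (PySem.List.pyRange 0 (d.length : Int) 1).foldl
      (fun st i => if (fun i => (PySem.List.pyRange (i + 1) ((d.length : Int)) 1).foldl
        (fun c j2 => if PySem.List.pyGetD d j2 0 < PySem.List.pyGetD d i 0 then c + 1 else c)
        ((PySem.List.pyRange 0 i 1).foldl
          (fun c j2 => if PySem.List.pyGetD d j2 0 > PySem.List.pyGetD d i 0 then c + 1 else c) (0 : Int))) i > st.1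
        then ((fun i => (PySem.List.pyRange (i + 1) ((d.length : Int)) 1).foldl
        (fun c j2 => if PySem.List.pyGetD d j2 0 < PySem.List.pyGetD d i 0 then c + 1 else c)
        ((PySem.List.pyRange 0 i 1).foldl
          (fun c j2 => if PySem.List.pyGetD d j2 0 > PySem.List.pyGetD d i 0 then c + 1 else c) (0 : Int))) i, i) else st)
      ((0 : Int), (0 : Int)) := rfl
  rw [← he] at hm
  rcases hm with h0 | hmem
  · rw [h0]; constructor <;> [omega; exact_mod_cast by omega]
  · rw [PySem.List.mem_pyRange_one] at hmem
    exact hmem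

-- every index A returns is a valid index of its input
lemma pop_worst (d : List Int) (h : is_sorted d = false) :
    PySem.List.pop? d (worstA d).2
      = some (d[(worstA d).2.toNat]!, d.eraseIdx (worstA d).2.toNat) := by
  obtain ⟨h0, h1⟩ := worstA_mem d h
  have hn : (worstA d).2.toNat < d.length := by omega
  have hc : ((worstA d).2.toNat : Int) = (worstA d).2 := by omega
  rw [← hc, PySem.List.pop?_natCast d _ hn]
  rw [getElem!_pos d _ hn]
  simp only [Int.toNat_natCast]

-- one-step unfoldings of A's recursion
lemma out_sorted (d : List Int) (h : is_sorted d = true) : out_of_order_indices d = [] := by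
  rw [out_of_order_indices, if_pos h]

lemma out_unfold (d : List Int) (h : is_sorted d = false) :
    out_of_order_indices d =
      (out_of_order_indices (d.eraseIdx (worstA d).2.toNat)).map
        (fun x => if (worstA d).2 ≤ x then x + 1 else x) ++ [(worstA d).2] := by
  conv_lhs => rw [out_of_order_indices]
  rw [if_neg (by simp [h])]
  show (match _h : PySem.List.pop? d (worstA d).2 with
    | none => []
    | some r => (out_of_order_indices r.2).map
        (fun x => if (worstA d).2 ≤ x then x + 1 else x) ++ [(worstA d).2]) = _
  split
  · rename_i heq
    rw [pop_worst d h] at heq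
    cases heq
  · rename_i r heq
    rw [pop_worst d h] at heq
    obtain rfl := Option.some.inj heq
    rfl

lemma out_range (d : List Int) : ∀ x ∈ out_of_order_indices d, 0 ≤ x ∧ x < (d.length : Int) := by
  have main : ∀ (n : Nat) (d : List Int), d.length = n →
      ∀ x ∈ out_of_order_indices d, 0 ≤ x ∧ x < (d.length : Int) := by
    intro n
    induction n using Nat.strong_induction_on with
    | _ n ih =>
      intro d hn x hx
      cases hs : is_sorted d with
      | true => rw [out_sorted d hs] at hx; simp at hx
      | false =>
        rw [out_unfold d hs] at hx
        obtain ⟨hw0, hw1⟩ := worstA_mem d hs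
        have hlr : (d.eraseIdx (worstA d).2.toNat).length = d.length - 1 := by
          rw [List.length_eraseIdx_of_lt (by omega)]
        have hlen1 : 1 ≤ d.length := by omega
        rcases List.mem_append.1 hx with hx1 | hx2
        · obtain ⟨y, hy, hxy⟩ := List.mem_map.1 hx1
          have hb := ih (d.eraseIdx (worstA d).2.toNat).length (by omega) _ rfl y hy
          rw [hlr] at hb
          subst hxy
          split_ifs with hle <;> constructor <;> [omega; omega; omega; omega]
        · have : x = (worstA d).2 := by simpa using hx2
          subst this
          exact ⟨hw0, hw1⟩
  exact main d.length d rfl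

lemma map_snd_enum (data : List Int) :
    (PySem.List.enumerate data).map Prod.snd = data := by
  exact PySem.List.map_snd_enumerate data 0

lemma pop_alt (items : List (Int × Int)) (hs : is_sorted (items.map Prod.snd) = false) :
    PySem.List.pop? items (altStep items).1
      = some (items[(worstA (items.map Prod.snd)).2.toNat]!,
          items.eraseIdx (worstA (items.map Prod.snd)).2.toNat) := by
  obtain ⟨h0, h1⟩ := worstA_mem _ hs
  rw [List.length_map] at h1
  have hn : (worstA (items.map Prod.snd)).2.toNat < items.length := by omega
  have hbi : (altStep items).1 = (worstA (items.map Prod.snd)).2 := by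
    rw [altStep_eq]; rfl
  have hc : ((worstA (items.map Prod.snd)).2.toNat : Int) = (worstA (items.map Prod.snd)).2 := by
    omega
  rw [hbi, ← hc, PySem.List.pop?_natCast items _ hn]
  rw [getElem!_pos items _ hn]
  simp only [Int.toNat_natCast]

-- one-step unfoldings of B's loop
lemma altGo_sorted (items : List (Int × Int)) (out : List Int)
    (hs : is_sorted (items.map Prod.snd) = true) : altGo items out = out := by
  rw [altGo, condB_eq, hs]
  simp

lemma altGo_unfold (items : List (Int × Int)) (out : List Int)
    (hs : is_sorted (items.map Prod.snd) = false) :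
    altGo items out
      = altGo (items.eraseIdx (worstA (items.map Prod.snd)).2.toNat)
          (out ++ [(items[(worstA (items.map Prod.snd)).2.toNat]!).1]) := by
  conv_lhs => rw [altGo]
  rw [condB_eq, hs]
  simp only [Bool.not_false, if_true]
  split
  · rename_i heq
    rw [pop_alt items hs] at heq
    cases heq
  · rename_i r heq
    rw [pop_alt items hs] at heq
    obtain rfl := Option.some.inj heq
    rfl

-- the loop of B computes A's result, read back through the carried original indices
lemma altGo_eq (items : List (Int × Int)) (out : List Int) :
    altGo items out
      = out ++ ((out_of_order_indices (items.map Prod.snd)).map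
          (fun i => (PySem.List.pyGetD items i ((0 : Int), (0 : Int))).1)).reverse := by
  have main : ∀ (n : Nat) (items : List (Int × Int)), items.length = n → ∀ (out : List Int),
      altGo items out
        = out ++ ((out_of_order_indices (items.map Prod.snd)).map
            (fun i => (PySem.List.pyGetD items i ((0 : Int), (0 : Int))).1)).reverse := by
    intro n
    induction n using Nat.strong_induction_on with
    | _ n ih =>
      intro items hn out
      cases hs : is_sorted (items.map Prod.snd) with
      | true =>
        rw [altGo_sorted items out hs, out_sorted _ hs]
        simp
      | false =>
        obtain ⟨hw0, hw1⟩ := worstA_mem _ hs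
        rw [List.length_map] at hw1
        set d := items.map Prod.snd with hd
        set w := (worstA d).2 with hwdef
        have hnn : w.toNat < items.length := by omega
        have hrestlen : (items.eraseIdx w.toNat).length = items.length - 1 := by
          rw [List.length_eraseIdx_of_lt hnn]
        rw [altGo_unfold items out hs]
        rw [ih (items.eraseIdx w.toNat).length (by omega) _ rfl]
        have hrestmap : (items.eraseIdx w.toNat).map Prod.snd = d.eraseIdx w.toNat := by
          rw [hd]; exact (List.eraseIdx_map _ _ _).symm
        rw [hrestmap, out_unfold d hs, ← hwdef]
        have hgw : (PySem.List.pyGetD items w ((0 : Int), (0 : Int))).1 = (items[w.toNat]!).1 := by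
          rw [PySem.List.pyGetD_eq_getElem _ _ hw0 (by exact_mod_cast hw1),
              getElem!_pos items _ hnn]
        have hmapeq :
            (out_of_order_indices (d.eraseIdx w.toNat)).map
              (fun i => (PySem.List.pyGetD (items.eraseIdx w.toNat) i ((0 : Int), (0 : Int))).1)
            = (out_of_order_indices (d.eraseIdx w.toNat)).map
              (fun y => (PySem.List.pyGetD items (if w ≤ y then y + 1 else y) ((0 : Int), (0 : Int))).1) := by
          apply List.map_congr_left
          intro y hy
          obtain ⟨hy0, hy1⟩ := out_range _ y hy
          have hery : (d.eraseIdx w.toNat).length = items.length - 1 := by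
            rw [← hrestmap, List.length_map, hrestlen]
          rw [hery] at hy1
          have hy1' : y < (items.length : Int) - 1 := by omega
          rw [PySem.List.pyGetD_eq_getElem _ _ hy0 (by rw [hrestlen]; omega)]
          by_cases hcase : w ≤ y
          · rw [if_pos hcase]
            rw [List.getElem_eraseIdx, dif_neg (by omega)]
            rw [PySem.List.pyGetD_eq_getElem _ _ (by omega) (by omega)]
            have hidx : (y + 1).toNat = y.toNat + 1 := by omega
            simp [hidx]
          · rw [if_neg hcase]
            rw [List.getElem_eraseIdx, dif_pos (by omega)]
            rw [PySem.List.pyGetD_eq_getElem _ _ hy0 (by omega)]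
        rw [hmapeq]
        simp only [List.map_append, List.map_map, List.reverse_append, List.map_cons,
          List.map_nil, List.reverse_cons, List.reverse_nil, List.nil_append,
          List.singleton_append, List.append_assoc, hgw]
        rfl
  exact main items.length items rfl out

-- ===== VERDICT (by name: the statement is the Claim_ definition above) =====
theorem out_of_order_indices_spec : Claim_equal_out_of_order_indices := by
  intro data _
  unfold Spec_out_of_order_indices out_of_order_indices_alt
  rw [altGo_eq, map_snd_enum]
  simp only [List.nil_append, List.reverse_reverse]
  have hg : ∀ y ∈ out_of_order_indices data,
      (PySem.List.pyGetD (PySem.List.enumerate data) y ((0 : Int), (0 : Int))).1 = y := by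
    intro y hy
    obtain ⟨hy0, hy1⟩ := out_range data y hy
    have hl : y < ((PySem.List.enumerate data).length : Int) := by
      rw [PySem.List.length_enumerate]; omega
    rw [PySem.List.pyGetD_eq_getElem _ _ hy0 hl, PySem.List.getElem_enumerate]
    simp
    omega
  calc out_of_order_indices data
      = (out_of_order_indices data).map id := by rw [List.map_id]
    _ = (out_of_order_indices data).map
          (fun i => (PySem.List.pyGetD (PySem.List.enumerate data) i ((0 : Int), (0 : Int))).1) := by
        apply List.map_congr_left
        intro y hy
        exact (hg y hy).symm
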